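-- pv_equiv track=rewrite | github.com/yidalinger/python- | day6/3.py | jc
-- ===== SOURCE A (Python) =====
-- def jc(n):
--     a = [1]
--     for i in range(2,n+1):
--         sum1 = 1
--         for j in range(1,i+1):
--             sum1 = sum1*j
--         a.append(a[-1]+sum1)
--     return a
-- ===== SOURCE B (Python) =====
-- def jc(n):
--     # one pass with a running factorial and running total (A recomputes each factorial from scratch)
--     out = [1]
--     fact = 1
--     total = 1
--     for i in range(2, n + 1):
--         fact *= i
--         total += fact
--         out.append(total)
--     return out
-- ===== Notes on version B (the rewrite author's own statement) =====
-- stated objective: faster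
-- what changed: B keeps a running factorial and running total in a single pass instead of recomputing each factorial with an inner loop, turning the nested loops into one loop.
import Mathlib
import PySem

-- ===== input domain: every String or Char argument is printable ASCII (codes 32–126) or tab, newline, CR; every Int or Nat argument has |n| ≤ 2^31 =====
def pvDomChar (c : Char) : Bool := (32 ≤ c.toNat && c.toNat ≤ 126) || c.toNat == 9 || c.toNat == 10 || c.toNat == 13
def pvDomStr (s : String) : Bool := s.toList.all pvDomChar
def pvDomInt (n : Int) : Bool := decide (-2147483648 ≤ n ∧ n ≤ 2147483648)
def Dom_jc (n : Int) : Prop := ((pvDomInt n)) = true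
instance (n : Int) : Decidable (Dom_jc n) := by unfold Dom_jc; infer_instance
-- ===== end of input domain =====

-- B replaces A's nested loops (factorial recomputed from scratch each step) by one pass with a running factorial and running total.

-- ===== PORT A =====
-- inner loop of A: sum1 = 1; for j in range(1, i+1): sum1 = sum1*j
def jcInner (i : Int) : Int :=
  (PySem.List.pyRange 1 (i + 1) 1).foldl (fun sum1 j => sum1 * j) 1

def jc (n : Int) : List Int :=
  (PySem.List.pyRange 2 (n + 1) 1).foldl
    (fun a i => a ++ [(PySem.List.pyGet? a (-1)).getD 0 + jcInner i]) [1]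

-- ===== PORT B =====
-- state is (out, fact, total)
def jc_alt (n : Int) : List Int :=
  ((PySem.List.pyRange 2 (n + 1) 1).foldl
    (fun (st : List Int × Int × Int) i =>
      (st.1 ++ [st.2.2 + st.2.1 * i], st.2.1 * i, st.2.2 + st.2.1 * i)) ([1], 1, 1)).1

-- ===== PRECONDITION & SPEC =====
def Spec_jc (n : Int) (out : List Int) : Prop := out = jc_alt n
instance (n : Int) (out : List Int) : Decidable (Spec_jc n out) := by unfold Spec_jc; infer_instance

-- ===== CLAIM (what is proved, stated in full; the proofs are below) =====
def Claim_equal_jc : Prop := ∀ (n : Int), Dom_jc n → Spec_jc n (jc n)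

-- ===== LEMMAS AND PROOFS =====

-- A's inner loop at i+1 multiplies the inner loop at i by (i+1)
theorem jcInner_succ (i : Int) (h : 0 ≤ i) : jcInner (i + 1) = jcInner i * (i + 1) := by
  unfold jcInner
  rw [show i + 1 + 1 = (i + 1) + 1 from rfl,
      PySem.List.pyRange_one_succ_right (by omega : (1:Int) ≤ i + 1),
      List.foldl_append]
  simp

-- joint invariant over the shared range 2 .. 2+m: the two folds build the same list,
-- B's fact is A's inner-loop value at m+1, and B's total is the last element of A's list
theorem jc_inv (m : Nat) :
    ((PySem.List.pyRange 2 (2 + (m : Int)) 1).foldl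
        (fun (st : List Int × Int × Int) i =>
          (st.1 ++ [st.2.2 + st.2.1 * i], st.2.1 * i, st.2.2 + st.2.1 * i)) ([1], 1, 1)).1
      = (PySem.List.pyRange 2 (2 + (m : Int)) 1).foldl
          (fun a i => a ++ [(PySem.List.pyGet? a (-1)).getD 0 + jcInner i]) [1]
    ∧ ((PySem.List.pyRange 2 (2 + (m : Int)) 1).foldl
        (fun (st : List Int × Int × Int) i =>
          (st.1 ++ [st.2.2 + st.2.1 * i], st.2.1 * i, st.2.2 + st.2.1 * i)) ([1], 1, 1)).2.1
      = jcInner ((m : Int) + 1)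
    ∧ PySem.List.pyGet?
        ((PySem.List.pyRange 2 (2 + (m : Int)) 1).foldl
          (fun a i => a ++ [(PySem.List.pyGet? a (-1)).getD 0 + jcInner i]) [1]) (-1)
      = some ((PySem.List.pyRange 2 (2 + (m : Int)) 1).foldl
          (fun (st : List Int × Int × Int) i =>
            (st.1 ++ [st.2.2 + st.2.1 * i], st.2.1 * i, st.2.2 + st.2.1 * i)) ([1], 1, 1)).2.2 := by
  induction m with
  | zero =>
      rw [PySem.List.pyRange_one_eq_nil (by omega : (2:Int) + ((0:Nat):Int) ≤ 2)]
      refine ⟨rfl, by decide, by decide⟩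
  | succ k ih =>
      obtain ⟨ih1, ih2, ih3⟩ := ih
      have hstep : jcInner (2 + (k : Int)) = jcInner ((k : Int) + 1) * ((k : Int) + 1 + 1) := by
        rw [(by ring : (2:Int) + (k:Int) = ((k:Int) + 1) + 1)]
        exact jcInner_succ _ (by omega)
      have hsplit : PySem.List.pyRange 2 (2 + (((k : Nat) + 1 : Nat) : Int)) 1
          = PySem.List.pyRange 2 (2 + (k : Int)) 1 ++ [2 + (k : Int)] := by
        rw [(by push_cast; ring : (2:Int) + (((k : Nat) + 1 : Nat) : Int) = (2 + (k:Int)) + 1)]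
        exact PySem.List.pyRange_one_succ_right (by omega)
      rw [hsplit]
      simp only [List.foldl_append, List.foldl_cons, List.foldl_nil]
      push_cast
      refine ⟨?_, ?_, ?_⟩
      · rw [ih3, Option.getD_some, ih1, ih2, hstep]
        ring_nf
      · rw [ih2, jcInner_succ ((k:Int) + 1) (by omega)]
        ring
      · rw [PySem.List.pyGet?_neg_one_append_singleton, ih3, Option.getD_some, ih2, hstep]
        ring_nf

-- ===== VERDICT (by name: the statement is the Claim_ definition above) =====
theorem jc_spec : Claim_equal_jc := by
  intro n _
  unfold Spec_jc jc jc_alt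
  by_cases h : n + 1 ≤ 2
  · rw [PySem.List.pyRange_one_eq_nil h]; rfl
  · have hm : n + 1 = 2 + ((n - 1).toNat : Int) := by omega
    rw [hm]
    exact (jc_inv (n - 1).toNat).1.symm
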